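-- pv_equiv track=rewrite | github.com/Bachmann1234/diff_cover | diff_cover/tests/helpers.py | _hunks
-- ===== SOURCE A (Python) =====
-- def _hunks(line_numbers):
--     """
--     Given a list of line numbers, return a list of hunks represented
--     as `(start, end)` tuples.
--     """
--
--     # Identify contiguous lines as hunks
--     hunks = []
--     last_line = None
--
--     for line in sorted(line_numbers):
--
--         # If this is contiguous with the last line, continue the hunk
--         # We're guaranteed at this point to have at least one hunk
--         if (line - 1) == last_line:
--             start, _ = hunks[-1]
--             hunks[-1]= (start, line)
--
--         # If non-contiguous, start a new hunk with just the current line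
--         else:
--             hunks.append((line, line))
--
--         # Store the last line
--         last_line = line
--
--     return hunks
-- ===== SOURCE B (Python) =====
-- def _hunks(line_numbers):
--     """
--     Given a list of line numbers, return a list of hunks represented
--     as `(start, end)` tuples.
--     """
--     s = sorted(line_numbers)
--     if not s:
--         return []
--     # A break sits between adjacent sorted values that do not differ by exactly 1
--     # (so equal duplicates also break, matching the intended hunk rule).
--     breaks = [(a, b) for a, b in zip(s, s[1:]) if b - a != 1]
--     starts = [s[0]] + [b for _, b in breaks]
--     ends = [a for a, _ in breaks] + [s[-1]]
--     return list(zip(starts, ends))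
-- ===== Notes on version B (the rewrite author's own statement) =====
-- stated objective: idiomatic
-- what changed: Replaces the stateful loop (last_line variable plus in-place mutation of the last hunk) by detecting breaks between adjacent sorted values and zipping the resulting start/end lists.
import Mathlib
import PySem

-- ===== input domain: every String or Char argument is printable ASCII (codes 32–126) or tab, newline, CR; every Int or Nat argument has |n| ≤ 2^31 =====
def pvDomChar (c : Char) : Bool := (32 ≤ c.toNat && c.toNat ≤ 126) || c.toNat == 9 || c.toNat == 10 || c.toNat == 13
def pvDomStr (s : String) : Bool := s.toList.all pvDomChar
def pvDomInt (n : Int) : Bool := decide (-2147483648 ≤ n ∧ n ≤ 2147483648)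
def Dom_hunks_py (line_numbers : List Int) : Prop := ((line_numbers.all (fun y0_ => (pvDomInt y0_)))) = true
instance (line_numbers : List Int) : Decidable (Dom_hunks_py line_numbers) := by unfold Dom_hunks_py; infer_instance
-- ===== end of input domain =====

-- B replaces A's stateful loop (mutating the last hunk and a last_line variable) by
-- break-detection over adjacent sorted pairs and a zip of the start/end lists (idiomatic, same cost).

-- ===== PORT A =====
-- one iteration of A's for-loop; state = (hunks, last_line)
def hunksStep (st : List (Int × Int) × Option Int) (line : Int) : List (Int × Int) × Option Int :=
  if st.2 = some (line - 1) then
    -- start, _ = hunks[-1]; hunks[-1] = (start, line)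
    match st.1.getLast? with
    | some (start, _) => (st.1.dropLast ++ [(start, line)], some line)
    | none => (st.1, some line)  -- unreachable: last_line ≠ None guarantees hunks ≠ []
  else
    (st.1 ++ [(line, line)], some line)

def hunks_py (line_numbers : List Int) : List (Int × Int) :=
  (List.foldl hunksStep ([], none) (PySem.List.sorted line_numbers (fun x => x) false)).1

-- ===== PORT B =====
def hunks_py_alt (line_numbers : List Int) : List (Int × Int) :=
  let s := PySem.List.sorted line_numbers (fun x => x) false
  match s with
  | [] => []
  | x :: t =>
    -- breaks = [(a, b) for a, b in zip(s, s[1:]) if b - a != 1]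
    let breaks := (List.zip (x :: t) t).filter (fun p => p.2 - p.1 != 1)
    -- starts = [s[0]] + [b for _, b in breaks]
    let starts := x :: breaks.map Prod.snd
    -- ends = [a for a, _ in breaks] + [s[-1]]   (s nonempty here, so s[-1] is its last element)
    let ends := breaks.map Prod.fst ++ [t.getLastD x]
    List.zip starts ends

-- ===== PRECONDITION & SPEC =====
def Spec_hunks_py (line_numbers : List Int) (out : List (Int × Int)) : Prop := out = hunks_py_alt line_numbers
instance (line_numbers : List Int) (out : List (Int × Int)) : Decidable (Spec_hunks_py line_numbers out) := by unfold Spec_hunks_py; infer_instance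

-- ===== CLAIM (what is proved, stated in full; the proofs are below) =====
def Claim_equal_hunks_py : Prop := ∀ (line_numbers : List Int), Dom_hunks_py line_numbers → Spec_hunks_py line_numbers (hunks_py line_numbers)

-- ===== LEMMAS AND PROOFS =====

-- common characterisation: hunks of the tail l, the open hunk being (a, b) (b = value last seen)
def specH (a b : Int) : List Int → List (Int × Int)
  | [] => [(a, b)]
  | v :: l => if b = v - 1 then specH a v l else (a, b) :: specH v v l

theorem foldA (l : List Int) : ∀ (a b : Int) (hs : List (Int × Int)),
    List.foldl hunksStep (hs ++ [(a, b)], some b) l = (hs ++ specH a b l, some (l.getLastD b)) := by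
  induction l with
  | nil => intro a b hs; simp [specH]
  | cons v l ih =>
    intro a b hs
    by_cases hb : b = v - 1
    · have h1 : hunksStep (hs ++ [(a, b)], some b) v = (hs ++ [(a, v)], some v) := by
        simp [hunksStep, hb]
      rw [List.foldl_cons, h1, ih a v hs]
      cases l <;> simp [specH, hb, List.getLastD]
    · have h1 : hunksStep (hs ++ [(a, b)], some b) v = ((hs ++ [(a, b)]) ++ [(v, v)], some v) := by
        simp [hunksStep, hb]
      rw [List.foldl_cons, h1, ih v v (hs ++ [(a, b)])]
      cases l <;> simp [specH, hb, List.getLastD]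

theorem zipSpec (l : List Int) : ∀ (a b : Int),
    List.zip (a :: ((List.zip (b :: l) l).filter (fun p => p.2 - p.1 != 1)).map Prod.snd)
             (((List.zip (b :: l) l).filter (fun p => p.2 - p.1 != 1)).map Prod.fst ++ [l.getLastD b])
    = specH a b l := by
  induction l with
  | nil => intro a b; simp [specH]
  | cons v l ih =>
    intro a b
    by_cases hb : b = v - 1
    · subst hb
      have hcond : ((v : Int) - (v - 1) != 1) = false := by simp
      simp only [List.zip_cons_cons, List.filter_cons, hcond, Bool.false_eq_true, if_false,
        List.getLastD_cons, specH]
      exact ih a v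
    · have hcond : ((v : Int) - b != 1) = true := by
        simp only [bne_iff_ne, ne_eq]; omega
      simp only [List.zip_cons_cons, List.filter_cons, hcond, if_true, List.map_cons,
        List.cons_append, List.zip_cons_cons, List.getLastD_cons, specH, if_neg hb]
      exact congrArg _ (ih v v)

-- ===== VERDICT (by name: the statement is the Claim_ definition above) =====
theorem hunks_py_spec : Claim_equal_hunks_py := by
  intro xs _
  unfold Spec_hunks_py hunks_py hunks_py_alt
  cases h : PySem.List.sorted xs (fun x => x) false with
  | nil => simp
  | cons x t =>
    have h0 : hunksStep ([], none) x = ([] ++ [(x, x)], some x) := by simp [hunksStep]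
    simp only [List.foldl_cons, h0, foldA t x x []]
    simpa using (zipSpec t x x).symm
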